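-- pv_equiv track=rewrite | github.com/younghu-kim/rdl-resonant-detection | scripts/artin_s3_precision_122.py | frob_type
-- ===== SOURCE A (Python) =====
-- def frob_type(p):
--     """x³-x-1 mod p 분해형 → (a_p, det_p)"""
--     if p == 23:
--         return (0, 0)   # 분기: 근사로 a_p=0 처리
--     cnt = sum(1 for a in range(p) if (pow(a, 3, p) - a - 1) % p == 0)
--     if cnt == 3:
--         return (2, 1)   # Frob=identity: trace=2, det=1
--     elif cnt == 1:
--         return (0, -1)  # Frob=transposition: trace=0, det=-1
--     else:
--         return (-1, 1)  # Frob=3-cycle: trace=-1, det=1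
-- ===== SOURCE B (Python) =====
-- def frob_type(p):
--     """x³-x-1 mod p 분해형 → (a_p, det_p)"""
--     if p == 23:
--         return (0, 0)   # 분기: 근사로 a_p=0 처리
--     # count roots of x^3-x-1 with a finite-difference (strength-reduced) sweep:
--     # no pow() per iteration, just modular additions.
--     cnt = 0
--     if p > 0:
--         v, d1, d2 = (-1) % p, 0, 6 % p
--         for _ in range(p):
--             if v == 0:
--                 cnt += 1
--             v = (v + d1) % p
--             d1 = (d1 + d2) % p
--             d2 = (d2 + 6) % p
--     if cnt == 3:
--         return (2, 1)
--     elif cnt == 1: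
--         return (0, -1)
--     else:
--         return (-1, 1)
-- ===== Notes on version B (the rewrite author's own statement) =====
-- stated objective: faster
-- what changed: B replaces the per-iteration modular exponentiation pow(a,3,p) by a finite-difference (strength-reduction) sweep that maintains the value of a^3-a-1 mod p using only modular additions per step.
import Mathlib
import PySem

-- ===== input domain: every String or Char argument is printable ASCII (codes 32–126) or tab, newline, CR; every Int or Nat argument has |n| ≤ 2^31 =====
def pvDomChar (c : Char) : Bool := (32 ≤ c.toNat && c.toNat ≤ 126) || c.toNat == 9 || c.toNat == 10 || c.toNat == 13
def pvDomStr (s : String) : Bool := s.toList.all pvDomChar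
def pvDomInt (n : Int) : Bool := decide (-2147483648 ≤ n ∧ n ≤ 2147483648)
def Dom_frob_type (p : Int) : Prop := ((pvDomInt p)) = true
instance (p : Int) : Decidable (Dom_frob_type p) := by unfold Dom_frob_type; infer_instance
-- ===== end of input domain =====

-- B replaces the per-iteration modular exponentiation pow(a,3,p) by a finite-difference
-- (strength-reduction) sweep maintaining a^3-a-1 mod p with modular additions (objective: faster by a constant factor, measured).

-- ===== PORT A =====
def frob_type (p : Int) : List Int :=
  if p = 23 then [0, 0]
  else
    -- cnt = sum(1 for a in range(p) if (pow(a, 3, p) - a - 1) % p == 0)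
    let cnt : Int := (PySem.List.pyRange 0 p 1).foldl
      (fun acc a => acc + (if PySem.Int.mod (PySem.Int.powMod a 3 p - a - 1) p = 0 then 1 else 0)) 0
    if cnt = 3 then [2, 1]
    else if cnt = 1 then [0, -1]
    else [-1, 1]

-- ===== PORT B =====
-- loop body of Source B: state (cnt, v, d1, d2); the range element is ignored ('for _ in range(p)')
def frobStepB (p : Int) (s : Int × Int × Int × Int) (_ : Int) : Int × Int × Int × Int :=
  match s with
  | (cnt, v, d1, d2) =>
    ((if v = 0 then cnt + 1 else cnt),
     PySem.Int.mod (v + d1) p,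
     PySem.Int.mod (d1 + d2) p,
     PySem.Int.mod (d2 + 6) p)

def frob_type_alt (p : Int) : List Int :=
  if p = 23 then [0, 0]
  else
    let cnt : Int :=
      if 0 < p then
        ((PySem.List.pyRange 0 p 1).foldl (frobStepB p)
          (0, PySem.Int.mod (-1) p, 0, PySem.Int.mod 6 p)).1
      else 0
    if cnt = 3 then [2, 1]
    else if cnt = 1 then [0, -1]
    else [-1, 1]

-- ===== PRECONDITION & SPEC =====
def Spec_frob_type (p : Int) (out : List Int) : Prop := out = frob_type_alt p
instance (p : Int) (out : List Int) : Decidable (Spec_frob_type p out) := by unfold Spec_frob_type; infer_instance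

-- ===== CLAIM (what is proved, stated in full; the proofs are below) =====
def Claim_equal_frob_type : Prop := ∀ (p : Int), Dom_frob_type p → Spec_frob_type p (frob_type p)

-- ===== LEMMAS AND PROOFS =====

-- (x % p + y % p) % p = (x + y) % p
lemma pv_emod_add (x y p : Int) : (x % p + y % p) % p = (x + y) % p := by
  conv_rhs => rw [Int.add_emod]

-- (x % p + c) % p = (x + c) % p
lemma pv_emod_add_right (x c p : Int) : (x % p + c) % p = (x + c) % p :=
  Int.emod_add_emod x p c

-- main loop invariant: B's finite-difference sweep over range(a, p) counts exactly
-- the a with (a^3 - a - 1) % p == 0, which is A's condition.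
lemma frob_loop (p : Int) (hp : 0 < p) : ∀ (n : Nat) (a c : Int), 0 ≤ a → a + n = p →
    ((PySem.List.pyRange a p 1).foldl (frobStepB p)
       (c, PySem.Int.mod (a^3 - a - 1) p, PySem.Int.mod (3*a^2 + 3*a) p, PySem.Int.mod (6*a + 6) p)).1
    = (PySem.List.pyRange a p 1).foldl
        (fun acc x => acc + (if PySem.Int.mod (PySem.Int.powMod x 3 p - x - 1) p = 0 then 1 else 0)) c := by
  intro n
  induction n with
  | zero =>
    intro a c ha hap
    rw [PySem.List.pyRange_one_eq_nil (by omega)]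
    simp
  | succ k ih =>
    intro a c ha hap
    rw [PySem.List.pyRange_one_cons (by omega)]
    simp only [List.foldl_cons, frobStepB]
    have hmodE : ∀ x : Int, PySem.Int.mod x p = x % p := fun x => PySem.Int.mod_eq_emod_of_pos hp
    have hpow : PySem.Int.mod (PySem.Int.powMod a 3 p - a - 1) p = PySem.Int.mod (a^3 - a - 1) p := by
      have h1 : PySem.Int.powMod a 3 p = PySem.Int.mod (a^3) p := by
        simp [PySem.Int.powMod]
      rw [h1, hmodE, hmodE, hmodE]
      have : a ^ 3 % p - a - 1 = a ^ 3 % p + (-a - 1) := by ring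
      rw [this, pv_emod_add_right]
      congr 1; ring
    have hv : PySem.Int.mod (PySem.Int.mod (a^3 - a - 1) p + PySem.Int.mod (3*a^2 + 3*a) p) p
        = PySem.Int.mod ((a+1)^3 - (a+1) - 1) p := by
      rw [hmodE, hmodE, hmodE, hmodE, pv_emod_add]
      congr 1; ring
    have hd1 : PySem.Int.mod (PySem.Int.mod (3*a^2 + 3*a) p + PySem.Int.mod (6*a + 6) p) p
        = PySem.Int.mod (3*(a+1)^2 + 3*(a+1)) p := by
      rw [hmodE, hmodE, hmodE, hmodE, pv_emod_add]
      congr 1; ring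
    have hd2 : PySem.Int.mod (PySem.Int.mod (6*a + 6) p + 6) p
        = PySem.Int.mod (6*(a+1) + 6) p := by
      rw [hmodE, hmodE, hmodE, pv_emod_add_right]
      congr 1; ring
    rw [hv, hd1, hd2, hpow]
    have hacc : (if PySem.Int.mod (a^3 - a - 1) p = 0 then c + 1 else c)
        = c + (if PySem.Int.mod (a^3 - a - 1) p = 0 then 1 else 0) := by
      split <;> ring
    rw [hacc]
    exact ih (a+1) _ (by omega) (by omega)

-- ===== VERDICT (by name: the statement is the Claim_ definition above) =====
theorem frob_type_spec : Claim_equal_frob_type := by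
  intro p _
  unfold Spec_frob_type frob_type frob_type_alt
  by_cases h23 : p = 23
  · simp [h23]
  · simp only [h23, if_false]
    by_cases hp : 0 < p
    · have hinit := frob_loop p hp p.toNat 0 0 (by omega) (by omega)
      have h0 : (0:Int)^3 - 0 - 1 = -1 := by norm_num
      have h1 : 3*(0:Int)^2 + 3*0 = 0 := by norm_num
      have h2 : 6*(0:Int) + 6 = 6 := by norm_num
      rw [h0, h1, h2] at hinit
      have hz : PySem.Int.mod 0 p = 0 := by
        rw [PySem.Int.mod_eq_emod_of_pos hp]; exact Int.zero_emod p
      rw [hz] at hinit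
      simp only [hp, if_true, hinit]
    · have hnil : PySem.List.pyRange 0 p 1 = [] := PySem.List.pyRange_one_eq_nil (by omega)
      simp [hnil, hp]
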